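-- pv_equiv track=rewrite | github.com/damiankiwi/kurs_python | 24/239.py | count_none
-- ===== SOURCE A (Python) =====
-- def count_none(input_list):
--     if not input_list:
--         return 0
--
--     head, *tail = input_list
--     if head is None:
--         return 1 + count_none(tail)
--     else:
--         return count_none(tail)
-- ===== SOURCE B (Python) =====
-- def count_none(input_list):
--     return input_list.count(None)
-- ===== Notes on version B (the rewrite author's own statement) =====
-- stated objective: idiomatic
-- what changed: Replaced A's recursive head/tail-unpacking (which copies the tail at each level) with a single built-in list.count(None) call; the empty-list guard is unnecessary since count of an empty list is 0.
import Mathlib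
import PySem

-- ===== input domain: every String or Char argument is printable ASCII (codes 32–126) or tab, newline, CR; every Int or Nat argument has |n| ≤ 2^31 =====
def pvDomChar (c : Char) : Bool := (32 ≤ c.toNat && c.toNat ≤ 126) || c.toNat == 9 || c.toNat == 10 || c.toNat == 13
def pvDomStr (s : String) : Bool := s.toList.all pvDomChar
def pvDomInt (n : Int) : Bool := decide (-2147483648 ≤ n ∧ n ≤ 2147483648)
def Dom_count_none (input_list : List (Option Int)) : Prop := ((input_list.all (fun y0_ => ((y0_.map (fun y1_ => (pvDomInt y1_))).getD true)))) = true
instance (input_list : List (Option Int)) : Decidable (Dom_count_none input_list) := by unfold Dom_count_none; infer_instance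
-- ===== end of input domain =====

-- B replaces A's recursive head/tail peeling with the built-in list.count(None) (idiomatic).

-- ===== PORT A =====
def count_none (input_list : List (Option Int)) : Int :=
  match input_list with
  | [] => 0
  | head :: tail =>
    if head = none then 1 + count_none tail
    else count_none tail

-- ===== PORT B =====
def count_none_alt (input_list : List (Option Int)) : Int :=
  (PySem.List.count input_list none : Int)

-- ===== PRECONDITION & SPEC =====
def Spec_count_none (input_list : List (Option Int)) (out : Int) : Prop := out = count_none_alt input_list
instance (input_list : List (Option Int)) (out : Int) : Decidable (Spec_count_none input_list out) := by unfold Spec_count_none; infer_instance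

-- ===== CLAIM (what is proved, stated in full; the proofs are below) =====
def Claim_equal_count_none : Prop := ∀ (input_list : List (Option Int)), Dom_count_none input_list → Spec_count_none input_list (count_none input_list)

-- ===== LEMMAS AND PROOFS =====
theorem count_none_eq_count (xs : List (Option Int)) :
    count_none xs = (List.count none xs : Int) := by
  induction xs with
  | nil => simp [count_none]
  | cons h t ih =>
    by_cases hh : h = none
    · subst hh; simp [count_none, ih]; ring
    · simp [count_none, hh, ih]

-- ===== VERDICT (by name: the statement is the Claim_ definition above) =====
theorem count_none_spec : Claim_equal_count_none := by
  intro xs _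
  unfold Spec_count_none count_none_alt
  rw [PySem.List.count_eq, count_none_eq_count]
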